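-- pv_equiv track=rewrite | github.com/milinia/machine_learning | gen_algorithm.py | make_child
-- ===== SOURCE A (Python) =====
-- import copy
--
-- def make_child(parent1, parent2):
--     offspring = copy.deepcopy(parent1)
--     element_set = set()
--     for n in range(0, 3):
--         element_set.add(parent1[n])
--     for k in range(3, 6):
--         for value in parent2:
--             if value not in element_set:
--                 offspring[k] = value
--                 element_set.add(value)
--                 break
--     return offspring
-- ===== SOURCE B (Python) =====
-- import copy
--
-- def make_child(parent1, parent2):
--     offspring = copy.deepcopy(parent1)
--     seen = set()
--     for n in range(0, 3):
--         seen.add(parent1[n])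
--     remaining = []
--     for v in parent2:
--         if v not in seen:
--             remaining.append(v)
--             seen.add(v)
--     idx = 0
--     for k in range(3, 6):
--         if idx < len(remaining):
--             offspring[k] = remaining[idx]
--             idx += 1
--     return offspring
-- ===== Notes on version B (the rewrite author's own statement) =====
-- stated objective: simpler
-- what changed: A rescans parent2 from the start for each of the three slots (nested loops with break); B scans parent2 once to collect the deduplicated fresh values into a list and then places them into slots 3..5 in a separate loop.
import Mathlib
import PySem

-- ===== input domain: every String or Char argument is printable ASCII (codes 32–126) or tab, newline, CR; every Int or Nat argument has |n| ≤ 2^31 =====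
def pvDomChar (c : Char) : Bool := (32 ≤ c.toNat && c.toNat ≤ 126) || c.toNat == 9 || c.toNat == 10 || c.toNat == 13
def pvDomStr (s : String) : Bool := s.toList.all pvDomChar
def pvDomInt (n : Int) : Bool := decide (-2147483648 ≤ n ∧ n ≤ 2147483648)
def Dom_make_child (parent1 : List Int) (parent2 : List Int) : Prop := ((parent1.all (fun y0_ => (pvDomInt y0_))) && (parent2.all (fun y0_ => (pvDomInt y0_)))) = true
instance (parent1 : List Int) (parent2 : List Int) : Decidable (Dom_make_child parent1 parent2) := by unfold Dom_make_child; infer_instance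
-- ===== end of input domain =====

-- B replaces A's per-slot rescans of parent2 (nested loop with break) by one scan of
-- parent2 collecting the fresh values, then a separate placement loop (objective: simpler).

-- ===== PORT A =====
-- inner 'for value in parent2: if value not in element_set: … break' — first fresh value
def pvFindFresh (s : PySem.Set Int) : List Int → Option Int
  | [] => none
  | v :: t => if v ∈ s then pvFindFresh s t else some v

def make_child (parent1 : List Int) (parent2 : List Int) : List Int :=
  let offspring := parent1
  let elementSet : PySem.Set Int :=
    (PySem.List.pyRange 0 3 1).foldl
      (fun s n => PySem.Set.add s ((PySem.List.pyGet? parent1 n).getD 0)) []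
  -- (parent1[n] raises IndexError for short parent1: excluded by Pre_; .getD 0 is unreached inside Pre_)
  let st := (PySem.List.pyRange 3 6 1).foldl
      (fun (st : PySem.Set Int × List Int) k =>
        match pvFindFresh st.1 parent2 with
        | none => st
        | some v => (PySem.Set.add st.1 v, st.2.set k.toNat v))
      (elementSet, offspring)
  st.2

-- ===== PORT B =====
def make_child_alt (parent1 : List Int) (parent2 : List Int) : List Int :=
  let offspring := parent1
  let seen : PySem.Set Int :=
    (PySem.List.pyRange 0 3 1).foldl
      (fun s n => PySem.Set.add s ((PySem.List.pyGet? parent1 n).getD 0)) []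
  let p := parent2.foldl
      (fun (st : PySem.Set Int × List Int) v =>
        if v ∈ st.1 then st else (PySem.Set.add st.1 v, st.2 ++ [v]))
      (seen, [])
  let remaining := p.2
  let q := (PySem.List.pyRange 3 6 1).foldl
      (fun (st : List Int × Nat) k =>
        if st.2 < remaining.length then (st.1.set k.toNat (remaining.getD st.2 0), st.2 + 1) else st)
      (offspring, 0)
  q.1

-- ===== PRECONDITION & SPEC =====
-- Pre_ excludes exactly the inputs where the Python A raises IndexError: parent1 shorter than 3
-- (reading parent1[0..2]), or parent1 too short to hold the fresh values assigned at slots 3..5.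
def Pre_make_child (parent1 : List Int) (parent2 : List Int) : Prop :=
  3 ≤ parent1.length ∧
  3 + min 3 (PySem.List.dedup (parent2.filter (fun v => !(parent1.take 3).contains v))).length ≤ parent1.length
instance (parent1 : List Int) (parent2 : List Int) : Decidable (Pre_make_child parent1 parent2) := by unfold Pre_make_child; infer_instance
def pvWitness_make_child : List Int × List Int := ([1, 2, 3, 4, 5, 6], [6, 5, 4, 3, 2, 1])

def Spec_make_child (parent1 : List Int) (parent2 : List Int) (out : List Int) : Prop := out = make_child_alt parent1 parent2
instance (parent1 : List Int) (parent2 : List Int) (out : List Int) : Decidable (Spec_make_child parent1 parent2 out) := by unfold Spec_make_child; infer_instance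

-- ===== CLAIM (what is proved, stated in full; the proofs are below) =====
def Claim_equal_make_child : Prop := ∀ (parent1 : List Int) (parent2 : List Int), Dom_make_child parent1 parent2 → Pre_make_child parent1 parent2 → Spec_make_child parent1 parent2 (make_child parent1 parent2)

-- ===== LEMMAS AND PROOFS =====

-- fresh values of p2 w.r.t. a running seen-set, in order, deduplicated
def pvRemB (s : PySem.Set Int) : List Int → List Int
  | [] => []
  | v :: t => if v ∈ s then pvRemB s t else v :: pvRemB (PySem.Set.add s v) t

theorem pvRemB_foldl (p2 : List Int) (s : PySem.Set Int) (acc : List Int) :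
    (p2.foldl
      (fun (st : PySem.Set Int × List Int) v =>
        if v ∈ st.1 then st else (PySem.Set.add st.1 v, st.2 ++ [v])) (s, acc)).2
      = acc ++ pvRemB s p2 := by
  induction p2 generalizing s acc with
  | nil => simp [pvRemB]
  | cons v t ih =>
    simp only [List.foldl, pvRemB]
    by_cases h : v ∈ s
    · simp [h, ih]
    · simp [h, ih]

theorem pvFindFresh_eq_head (s : PySem.Set Int) (p2 : List Int) :
    pvFindFresh s p2 = (pvRemB s p2).head? := by
  induction p2 generalizing s with
  | nil => rfl
  | cons v t ih =>
    simp only [pvFindFresh, pvRemB]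
    by_cases h : v ∈ s
    · simp [h, ih]
    · simp [h]

theorem pvRemB_add (p2 : List Int) (s : PySem.Set Int) (v : Int) (rest : List Int)
    (h : pvRemB s p2 = v :: rest) : pvRemB (PySem.Set.add s v) p2 = rest := by
  induction p2 generalizing s with
  | nil => simp [pvRemB] at h
  | cons w t ih =>
    by_cases hw : w ∈ s
    · have hw' : w ∈ PySem.Set.add s v := by
        rw [PySem.Set.mem_add]; exact Or.inl hw
      simp only [pvRemB, if_pos hw] at h
      simp only [pvRemB, if_pos hw']
      exact ih s h
    · simp only [pvRemB, if_neg hw] at h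
      obtain ⟨rfl, hrest⟩ : w = v ∧ pvRemB (PySem.Set.add s w) t = rest := by
        constructor
        · exact (List.cons.injEq _ _ _ _ ▸ h).1
        · exact (List.cons.injEq _ _ _ _ ▸ h).2
      have hw' : w ∈ PySem.Set.add s w := by
        rw [PySem.Set.mem_add]; exact Or.inr rfl
      simp only [pvRemB, if_pos hw']
      exact hrest

theorem pyRange36 : PySem.List.pyRange 3 6 1 = [3, 4, 5] := by decide

theorem ports_eq (p1 p2 : List Int) : make_child p1 p2 = make_child_alt p1 p2 := by
  unfold make_child make_child_alt
  simp only []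
  set s0 : PySem.Set Int :=
    (PySem.List.pyRange 0 3 1).foldl
      (fun s n => PySem.Set.add s ((PySem.List.pyGet? p1 n).getD 0)) [] with hs0
  rw [pvRemB_foldl p2 s0 []]
  simp only [List.nil_append]
  rw [pyRange36]
  rcases hr : pvRemB s0 p2 with - | ⟨a, - | ⟨b, - | ⟨c, r⟩⟩⟩
  · have h1 : pvFindFresh s0 p2 = none := by rw [pvFindFresh_eq_head, hr]; rfl
    simp [List.foldl, h1]
  · have h1 : pvFindFresh s0 p2 = some a := by rw [pvFindFresh_eq_head, hr]; rfl
    have hr2 : pvRemB (PySem.Set.add s0 a) p2 = [] := pvRemB_add p2 s0 a [] hr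
    have h2 : pvFindFresh (PySem.Set.add s0 a) p2 = none := by
      rw [pvFindFresh_eq_head, hr2]; rfl
    simp [List.foldl, h1, h2]
  · have h1 : pvFindFresh s0 p2 = some a := by rw [pvFindFresh_eq_head, hr]; rfl
    have hr2 : pvRemB (PySem.Set.add s0 a) p2 = [b] := pvRemB_add p2 s0 a [b] hr
    have h2 : pvFindFresh (PySem.Set.add s0 a) p2 = some b := by
      rw [pvFindFresh_eq_head, hr2]; rfl
    have hr3 : pvRemB (PySem.Set.add (PySem.Set.add s0 a) b) p2 = [] :=
      pvRemB_add p2 (PySem.Set.add s0 a) b [] hr2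
    have h3 : pvFindFresh (PySem.Set.add (PySem.Set.add s0 a) b) p2 = none := by
      rw [pvFindFresh_eq_head, hr3]; rfl
    simp [List.foldl, h1, h2, h3]
  · have h1 : pvFindFresh s0 p2 = some a := by rw [pvFindFresh_eq_head, hr]; rfl
    have hr2 : pvRemB (PySem.Set.add s0 a) p2 = b :: c :: r := pvRemB_add p2 s0 a _ hr
    have h2 : pvFindFresh (PySem.Set.add s0 a) p2 = some b := by
      rw [pvFindFresh_eq_head, hr2]; rfl
    have hr3 : pvRemB (PySem.Set.add (PySem.Set.add s0 a) b) p2 = c :: r :=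
      pvRemB_add p2 (PySem.Set.add s0 a) b _ hr2
    have h3 : pvFindFresh (PySem.Set.add (PySem.Set.add s0 a) b) p2 = some c := by
      rw [pvFindFresh_eq_head, hr3]; rfl
    simp [List.foldl, h1, h2, h3, List.getD]

-- ===== VERDICT (by name: the statement is the Claim_ definition above) =====
theorem make_child_spec : Claim_equal_make_child := by
  intro p1 p2 _ _
  unfold Spec_make_child
  exact ports_eq p1 p2
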